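-- pv_equiv track=rewrite | github.com/midhi-14321/python-problems | missing_number.py | missing_even_numbers
-- ===== SOURCE A (Python) =====
-- def missing_even_numbers(lst):
--     minimum=float("inf")
--     maximum=float("-inf")
--     missing_numbers=[]
--     for i in lst:
--         if i>maximum:
--             maximum=i
--         if i<minimum:
--             minimum=i
--     for i in range(minimum,maximum+1):
--         if i not in lst and i%2==0:
--             missing_numbers.append(i)
--     return missing_numbers
-- ===== SOURCE B (Python) =====
-- def missing_even_numbers(lst):
--     xs = sorted(set(lst))
--     out = []
--     for a, b in zip(xs, xs[1:]):
--         e = a + 1 if (a + 1) % 2 == 0 else a + 2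
--         while e < b:
--             out.append(e)
--             e += 2
--     return out
-- ===== Notes on version B (the rewrite author's own statement) =====
-- stated objective: faster
-- what changed: Instead of scanning the whole integer range with a per-element 'i not in lst' membership test, B sorts the deduplicated input once and emits the even numbers inside each gap between consecutive distinct elements, never touching integers that sit inside the list; Pre_ excludes the empty list, on which A raises TypeError (range over float inf).
import Mathlib
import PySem

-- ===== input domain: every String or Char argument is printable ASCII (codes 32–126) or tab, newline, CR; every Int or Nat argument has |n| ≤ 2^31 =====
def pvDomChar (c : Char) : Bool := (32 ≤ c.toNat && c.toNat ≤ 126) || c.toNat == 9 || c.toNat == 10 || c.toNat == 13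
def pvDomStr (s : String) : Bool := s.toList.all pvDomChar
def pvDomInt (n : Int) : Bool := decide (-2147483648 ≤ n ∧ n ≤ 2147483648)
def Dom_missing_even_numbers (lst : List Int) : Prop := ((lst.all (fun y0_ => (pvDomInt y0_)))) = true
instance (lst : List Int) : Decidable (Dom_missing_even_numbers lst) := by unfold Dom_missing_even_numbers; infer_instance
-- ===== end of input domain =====

-- B sorts the deduplicated input once and emits the evens inside each gap between
-- consecutive distinct elements, instead of A's per-element membership scan over the
-- whole range (faster).

-- ===== PORT A =====
-- A's float('inf')/float('-inf') sentinels are ported as Option Int (none = not yet updated);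
-- exact: the sentinel compares greater/less than every int, so the first element always replaces it.
def missing_even_numbers (lst : List Int) : List Int :=
  let st := lst.foldl
    (fun (s : Option Int × Option Int) i =>
      ((if (match s.1 with | none => true | some m => decide (m < i)) then some i else s.1),
       (if (match s.2 with | none => true | some m => decide (i < m)) then some i else s.2)))
    (none, none)
  match st with
  | (some mx, some mn) =>
      (PySem.List.pyRange mn (mx + 1) 1).foldl
        (fun acc i => if i ∉ lst ∧ PySem.Int.mod i 2 = 0 then acc ++ [i] else acc) []
  | _ => []  -- empty list: Python raises TypeError here (range over float); outside Pre_

-- ===== PORT B =====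
-- the 'while e < b: append e; e += 2' inner loop of Source B
def pvGapEvens (e b : Int) : List Int :=
  if _h : e < b then e :: pvGapEvens (e + 2) b else []
termination_by (b - e).toNat
decreasing_by omega

def missing_even_numbers_alt (lst : List Int) : List Int :=
  let xs := PySem.List.sorted (PySem.Set.ofList lst) (fun x => x)
  (xs.zip xs.tail).foldl
    (fun out p =>
      let e := if PySem.Int.mod (p.1 + 1) 2 = 0 then p.1 + 1 else p.1 + 2
      out ++ pvGapEvens e p.2) []

-- ===== PRECONDITION & SPEC =====
-- Pre_ excludes only the empty list, on which A raises TypeError (range over float inf).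
def Pre_missing_even_numbers (lst : List Int) : Prop := lst ≠ []
instance (lst : List Int) : Decidable (Pre_missing_even_numbers lst) := by
  unfold Pre_missing_even_numbers; infer_instance
def pvWitness_missing_even_numbers : List Int := [1, 2, 5]

def Spec_missing_even_numbers (lst : List Int) (out : List Int) : Prop := out = missing_even_numbers_alt lst
instance (lst : List Int) (out : List Int) : Decidable (Spec_missing_even_numbers lst out) := by unfold Spec_missing_even_numbers; infer_instance

-- ===== CLAIM (what is proved, stated in full; the proofs are below) =====
def Claim_equal_missing_even_numbers : Prop := ∀ (lst : List Int), Dom_missing_even_numbers lst → Pre_missing_even_numbers lst → Spec_missing_even_numbers lst (missing_even_numbers lst)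

-- ===== LEMMAS AND PROOFS =====

theorem pv_mod_two (x : Int) : (PySem.Int.mod x 2 = 0) ↔ 2 ∣ x := by
  rw [PySem.Int.mod, Int.fmod_eq_emod]; omega

-- A's running min/max fold, once started, computes List.foldl max / min.
theorem pv_fold_minmax (t : List Int) (mx mn : Int) :
    t.foldl
      (fun (s : Option Int × Option Int) i =>
        ((if (match s.1 with | none => true | some m => decide (m < i)) then some i else s.1),
         (if (match s.2 with | none => true | some m => decide (i < m)) then some i else s.2)))
      (some mx, some mn)
    = (some (t.foldl max mx), some (t.foldl min mn)) := by
  induction t generalizing mx mn with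
  | nil => rfl
  | cons a t ih =>
    simp only [List.foldl_cons]
    have h1 : (if decide (mx < a) = true then some a else some mx) = some (max mx a) := by
      rcases lt_or_ge mx a with h | h
      · simp [h, max_eq_right h.le]
      · simp [not_lt.mpr h, max_eq_left h]
    have h2 : (if decide (a < mn) = true then some a else some mn) = some (min mn a) := by
      rcases lt_or_ge a mn with h | h
      · simp [h, min_eq_right h.le]
      · simp [not_lt.mpr h, min_eq_left h]
    simp only [h1, h2] at *
    exact ih (max mx a) (min mn a)

-- a strictly increasing list is bounded by its last element
theorem pv_le_getLast (xs : List Int) (hp : xs.Pairwise (· < ·)) (hne : xs ≠ []) :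
    ∀ y ∈ xs, y ≤ xs.getLast hne := by
  induction xs with
  | nil => simp at hne
  | cons a t ih =>
    intro y hy
    cases t with
    | nil => simp at hy; simp [hy]
    | cons b r =>
      rw [List.getLast_cons (by simp)]
      rcases List.mem_cons.mp hy with rfl | hy'
      · have hab : y < b := (List.pairwise_cons.mp hp).1 b (by simp)
        have := ih (List.pairwise_cons.mp hp).2 (by simp) b (by simp)
        omega
      · exact ih (List.pairwise_cons.mp hp).2 (by simp) y hy'

-- the inner while loop collects exactly the even numbers of [e, b) when e is even
theorem pv_gapEvens_eq_filter (e b : Int) (he : 2 ∣ e) :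
    pvGapEvens e b
      = (PySem.List.pyRange e b 1).filter (fun i => decide (PySem.Int.mod i 2 = 0)) := by
  by_cases h : e < b
  · rw [pvGapEvens, dif_pos h, PySem.List.pyRange_one_cons h]
    rw [List.filter_cons_of_pos (by simp; exact he)]
    by_cases h1 : e + 1 < b
    · rw [PySem.List.pyRange_one_cons h1]
      rw [List.filter_cons_of_neg (by simp; omega)]
      have h2 : e + 1 + 1 = e + 2 := by ring
      rw [h2]
      exact congrArg _ (pv_gapEvens_eq_filter (e + 2) b (by omega))
    · have h2 : ¬ e + 2 < b := by omega
      rw [pvGapEvens, dif_neg h2, PySem.List.pyRange_one_eq_nil (by omega)]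
      simp
  · rw [pvGapEvens, dif_neg h, PySem.List.pyRange_one_eq_nil (by omega)]
    simp
termination_by (b - e).toNat
decreasing_by omega

-- the gap scan over a strictly increasing list equals the range filter of A
theorem pv_gaps_eq_filter (xs : List Int) (hp : xs.Pairwise (· < ·)) (hne : xs ≠ []) :
    (xs.zip xs.tail).flatMap
        (fun p : Int × Int =>
          pvGapEvens (if PySem.Int.mod (p.1 + 1) 2 = 0 then p.1 + 1 else p.1 + 2) p.2)
      = (PySem.List.pyRange (xs.head hne) (xs.getLast hne + 1) 1).filter
          (fun i => decide (i ∉ xs ∧ PySem.Int.mod i 2 = 0)) := by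
  induction xs with
  | nil => simp at hne
  | cons a t ih =>
    cases t with
    | nil =>
      simp only [List.zip_nil_right, List.tail_cons, List.flatMap_nil, List.head_cons,
        List.getLast_singleton]
      rw [PySem.List.pyRange_one_cons (by omega), PySem.List.pyRange_one_eq_nil (by omega)]
      simp
    | cons b r =>
      have hab : a < b := (List.pairwise_cons.mp hp).1 b (by simp)
      have hpt : (b :: r).Pairwise (· < ·) := (List.pairwise_cons.mp hp).2
      have hbl : b ≤ (b :: r).getLast (by simp) :=
        pv_le_getLast _ hpt (by simp) b (by simp)
      -- split the zip and the range
      simp only [List.tail_cons, List.zip_cons_cons, List.flatMap_cons]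
      have ih' := ih hpt (by simp)
      simp only [List.tail_cons] at ih'
      rw [ih']
      have hgl : (a :: b :: r).getLast (by simp) = (b :: r).getLast (by simp) :=
        List.getLast_cons (by simp)
      simp only [List.head_cons, hgl]
      rw [PySem.List.pyRange_one_append a b ((b :: r).getLast (by simp) + 1)
        (by omega) (by omega), List.filter_append]
      congr 1
      · -- first gap: evens of (a, b)
        rw [pv_gapEvens_eq_filter _ b (by
          split
          · exact (pv_mod_two _).mp (by assumption)
          · have := (not_iff_not.mpr (pv_mod_two (a + 1))).mp (by assumption); omega)]
        -- range [a, b) = a :: (range of start zone) …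
        rw [PySem.List.pyRange_one_cons hab]
        rw [List.filter_cons_of_neg (by simp)]
        -- on (a, b) membership in xs is false
        have hmemeq : ∀ i ∈ PySem.List.pyRange (a + 1) b 1,
            (decide (i ∉ a :: b :: r ∧ PySem.Int.mod i 2 = 0))
              = (decide (PySem.Int.mod i 2 = 0)) := by
          intro i hi
          rw [PySem.List.mem_pyRange_one] at hi
          have hnm : i ∉ a :: b :: r := by
            intro hmem
            rcases List.mem_cons.mp hmem with rfl | hmem'
            · omega
            · rcases List.mem_cons.mp hmem' with rfl | hmem''
              · omega
              · have : b < i := (List.pairwise_cons.mp hpt).1 i hmem''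
                omega
          simp [hnm]
        rw [List.filter_congr hmemeq]
        -- align the filtered starts: the step-2 start skips exactly the odd a+1
        by_cases hpar : PySem.Int.mod (a + 1) 2 = 0
        · rw [if_pos hpar]
        · rw [if_neg hpar]
          by_cases h1 : a + 1 < b
          · rw [PySem.List.pyRange_one_cons h1, List.filter_cons_of_neg (by
                simp
                have := (not_iff_not.mpr (pv_mod_two (a + 1))).mp hpar
                omega)]
            have h2 : a + 1 + 1 = a + 2 := by ring
            rw [h2]
          · rw [PySem.List.pyRange_one_eq_nil (by omega),
              PySem.List.pyRange_one_eq_nil (by omega)]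
      · -- tail: membership in a :: … coincides with membership in b :: … on [b, last]
        apply List.filter_congr
        intro i hi
        rw [PySem.List.mem_pyRange_one] at hi
        have hna : i ≠ a := by omega
        simp [List.mem_cons, hna]

theorem missing_even_numbers_eq_alt (lst : List Int) (h : lst ≠ []) :
    missing_even_numbers lst = missing_even_numbers_alt lst := by
  obtain ⟨x, t, rfl⟩ := List.exists_cons_of_ne_nil h
  unfold missing_even_numbers missing_even_numbers_alt
  simp only [List.foldl_cons, if_true]
  rw [pv_fold_minmax]
  simp only []
  set lst := x :: t with hlst
  set xs := PySem.List.sorted (PySem.Set.ofList lst) (fun x => x) with hxs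
  have hxp : xs.Pairwise (· < ·) := PySem.List.sorted_ofList_pairwise_lt lst
  have hmemxs : ∀ i, i ∈ xs ↔ i ∈ lst := by
    intro i
    rw [hxs, PySem.List.mem_sorted, PySem.Set.mem_ofList]
  have hxsne : xs ≠ [] := by
    intro hc
    have : x ∈ xs := (hmemxs x).mpr (by simp [hlst])
    simp [hc] at this
  -- B's foldl is a flatMap
  rw [PySem.List.foldl_append_eq_flatMap]
  rw [pv_gaps_eq_filter xs hxp hxsne]
  -- the head of xs is A's running min, the last is A's running max
  have hmin := PySem.List.min?_id_cons x t
  have hmax := PySem.List.max?_id_cons x t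
  have hhead : xs.head hxsne = t.foldl min x := by
    have h1 : xs.head hxsne ∈ lst := (hmemxs _).mp (List.head_mem hxsne)
    have h2 : ∀ y ∈ lst, xs.head hxsne ≤ y := by
      intro y hy
      obtain ⟨hd, tl, hcons⟩ := List.exists_cons_of_ne_nil hxsne
      have := PySem.List.key_head_sorted_le (xs := PySem.Set.ofList lst)
        (key := fun z => z) (m := hd) (t := tl) (by rw [← hxs, hcons]) y
        ((PySem.Set.mem_ofList _ _).mpr hy)
      simpa [hcons] using this
    have h3 : t.foldl min x ∈ lst := PySem.List.min?_mem hmin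
    have h4 : ∀ y ∈ lst, t.foldl min x ≤ y := PySem.List.min?_isMin hmin
    exact le_antisymm (h2 _ h3) (h4 _ h1)
  have hlast : xs.getLast hxsne = t.foldl max x := by
    have h1 : xs.getLast hxsne ∈ lst := (hmemxs _).mp (List.getLast_mem hxsne)
    have h2 : ∀ y ∈ lst, y ≤ xs.getLast hxsne := by
      intro y hy
      exact pv_le_getLast xs hxp hxsne y ((hmemxs y).mpr hy)
    have h3 : t.foldl max x ∈ lst := PySem.List.max?_mem hmax
    have h4 : ∀ y ∈ lst, y ≤ t.foldl max x := PySem.List.max?_isMax hmax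
    exact le_antisymm (h4 _ h1) (h2 _ h3)
  rw [hhead, hlast]
  -- A's loop is a filter of the unit-step range
  rw [PySem.List.foldl_append_ite_eq_filter
        (fun i => i ∉ lst ∧ PySem.Int.mod i 2 = 0) (PySem.List.pyRange (t.foldl min x) (t.foldl max x + 1) 1) []]
  simp only [List.nil_append]
  apply List.filter_congr
  intro i _
  simp [hmemxs i]

-- ===== VERDICT (by name: the statement is the Claim_ definition above) =====
theorem missing_even_numbers_spec : Claim_equal_missing_even_numbers := by
  intro lst _ hpre
  unfold Spec_missing_even_numbers
  exact missing_even_numbers_eq_alt lst hpre
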